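-- pv_equiv track=rewrite | github.com/timmyyuan/gobench-eq | dataset/cases/goeq-ojva-0391/artifacts/codon-llvm-release-noexc-v1/prog_a/preprocessed.py | dfs
-- ===== SOURCE A (Python) =====
-- def dfs(links, n, k, v, p):
--     C = links
--     A = 0
--     B = 0
--     for D in C[v]:
--         if D == 0:
--             continue
--         E, F = dfs(C, n, k, D, v)
--         A = max(A, E)
--         B += F
--     A += 1
--     if p != 0 and A == k:
--         A = 0
--         B += 1
--     return (A, B)
-- ===== SOURCE B (Python) =====
-- def dfs(links, n, k, v, p):
--     # Recursion-free fixed-point DP: repeatedly sweep the keys, finalizing any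
--     # node whose non-zero children are all finalized; each node stores its
--     # pre-reset (chain, count) and the parent applies the k-reset when reading.
--     def adjust(pair, par):
--         chain, cnt = pair
--         if par != 0 and chain == k:
--             return (0, cnt + 1)
--         return pair
--     res = {}
--     for _ in range(len(links) + 1):
--         for u in links:
--             if u in res:
--                 continue
--             kids = [c for c in links[u] if c != 0]
--             if all(c in res for c in kids):
--                 best, total = 0, 0
--                 for c in kids:
--                     cc, ct = adjust(res[c], u)
--                     best = max(best, cc)
--                     total += ct
--                 res[u] = (best + 1, total)
--     return adjust(res[v], p)
-- ===== Notes on version B (the rewrite author's own statement) =====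
-- stated objective: alternative
-- what changed: Replaces A's top-down recursion by a recursion-free fixed-point sweep: repeated passes over the keys finalize any node whose non-zero children are all finalized, each node stores its pre-reset (chain,count), and the parent applies the k-reset when reading a child; the answer is the adjusted entry of v.
import Mathlib
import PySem

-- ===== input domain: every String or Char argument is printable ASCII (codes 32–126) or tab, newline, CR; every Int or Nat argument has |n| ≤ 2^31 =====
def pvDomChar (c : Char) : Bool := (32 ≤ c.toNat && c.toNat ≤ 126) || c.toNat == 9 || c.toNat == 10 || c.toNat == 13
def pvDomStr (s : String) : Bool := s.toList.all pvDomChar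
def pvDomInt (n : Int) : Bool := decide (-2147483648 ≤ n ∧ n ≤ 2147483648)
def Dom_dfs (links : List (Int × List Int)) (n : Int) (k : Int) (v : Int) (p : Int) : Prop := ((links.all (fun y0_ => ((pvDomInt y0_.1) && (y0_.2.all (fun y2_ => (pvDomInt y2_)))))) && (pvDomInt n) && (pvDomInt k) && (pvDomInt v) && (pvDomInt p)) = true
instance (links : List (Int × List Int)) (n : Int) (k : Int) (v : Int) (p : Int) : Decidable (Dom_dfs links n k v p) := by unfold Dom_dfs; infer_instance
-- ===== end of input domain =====

-- B replaces A's top-down recursion by a recursion-free fixed-point sweep (worklist-style DP); return value only.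

-- ===== PORT A =====
-- fuel-indexed transliteration of A's recursion; under Pre_ every recursion path is acyclic,
-- so fuel links.length + 1 is enough (proved below) and the fuel guard only makes it total
def dfsA : Nat → List (Int × List Int) → Int → Int → Int → Int → Int × Int
  | 0, _, _, _, _, _ => (0, 0)
  | Nat.succ f, links, n, k, v, p =>
      let cs := ((PySem.Dict.mk links).get? v).getD []   -- C[v]; KeyError (none) excluded by Pre_
      let ab := cs.foldl (fun ab D =>
          if D = 0 then ab
          else
            let ef := dfsA f links n k D v
            (max ab.1 ef.1, ab.2 + ef.2)) ((0 : Int), (0 : Int))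
      if p ≠ 0 ∧ ab.1 + 1 = k then ((0 : Int), ab.2 + 1) else (ab.1 + 1, ab.2)

def dfs (links : List (Int × List Int)) (n : Int) (k : Int) (v : Int) (p : Int) : Int × Int :=
  dfsA (links.length + 1) links n k v p

-- ===== PORT B =====
-- `[c for c in links[u] if c != 0]` — the non-zero children of u (also used by Pre_ below)
def pvChildren (links : List (Int × List Int)) (u : Int) : List Int :=
  (((PySem.Dict.mk links).get? u).getD []).filter (fun c => c ≠ 0)

-- B's `adjust(pair, par)`
def pvAdjust (k par : Int) (ab : Int × Int) : Int × Int :=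
  if par ≠ 0 ∧ ab.1 = k then ((0 : Int), ab.2 + 1) else ab

-- B's inner sweep body: finalize u if not yet finalized and all its children are
def pvStepB (links : List (Int × List Int)) (k : Int)
    (res : PySem.Dict Int (Int × Int)) (u : Int) : PySem.Dict Int (Int × Int) :=
  if res.contains u then res
  else
    let kids := pvChildren links u
    if kids.all (fun c => res.contains c) then
      let ab := kids.foldl (fun ab c =>
          let r := pvAdjust k u ((res.get? c).getD ((0 : Int), (0 : Int)))
          (max ab.1 r.1, ab.2 + r.2)) ((0 : Int), (0 : Int))
      res.insert u (ab.1 + 1, ab.2)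
    else res

-- one full sweep over the keys (the inner `for u in links` loop)
def pvSweep (links : List (Int × List Int)) (k : Int)
    (res : PySem.Dict Int (Int × Int)) : PySem.Dict Int (Int × Int) :=
  (PySem.Dict.mk links).keys.foldl (pvStepB links k) res

def dfs_alt (links : List (Int × List Int)) (n : Int) (k : Int) (v : Int) (p : Int) : Int × Int :=
  let res := (List.range ((PySem.Dict.mk links).keys.length + 1)).foldl
      (fun res _ => pvSweep links k res) PySem.Dict.empty
  pvAdjust k p ((res.get? v).getD ((0 : Int), (0 : Int)))   -- adjust(res[v], p); res[v] present under Pre_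

-- ===== PRECONDITION & SPEC =====
-- closure of the child relation by iterated expansion (plain graph reachability, not either algorithm):
-- pvDesc links u = every node reachable from u through non-zero child links
def pvF (links : List (Int × List Int)) (S : Finset Int) : Finset Int :=
  S ∪ S.biUnion (fun u => (pvChildren links u).toFinset)
def pvN (links : List (Int × List Int)) : Nat := (links.flatMap (fun x => x.2)).length + 1
def pvDesc (links : List (Int × List Int)) (u : Int) : Finset Int :=
  (pvF links)^[pvN links] (pvChildren links u).toFinset
def pvKeysFin (links : List (Int × List Int)) : Finset Int := (links.map Prod.fst).toFinset

-- Pre_ is exactly the domain on which the Python A returns: every node reachable from v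
-- is a key (else A raises KeyError) and lies on no cycle (else A recurses forever)
def Pre_dfs (links : List (Int × List Int)) (n : Int) (k : Int) (v : Int) (p : Int) : Prop :=
  ∀ u ∈ insert v (pvDesc links v), u ∈ pvKeysFin links ∧ u ∉ pvDesc links u
instance (links : List (Int × List Int)) (n : Int) (k : Int) (v : Int) (p : Int) : Decidable (Pre_dfs links n k v p) := by unfold Pre_dfs; infer_instance

def pvWitness_dfs : (List (Int × List Int)) × Int × Int × Int × Int :=
  ([(1, [2, 0]), (2, [0])], 2, 2, 1, 0)

def Spec_dfs (links : List (Int × List Int)) (n : Int) (k : Int) (v : Int) (p : Int) (out : Int × Int) : Prop := out = dfs_alt links n k v p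
instance (links : List (Int × List Int)) (n : Int) (k : Int) (v : Int) (p : Int) (out : Int × Int) : Decidable (Spec_dfs links n k v p out) := by unfold Spec_dfs; infer_instance

-- ===== CLAIM (what is proved, stated in full; the proofs are below) =====
def Claim_equal_dfs : Prop := ∀ (links : List (Int × List Int)) (n : Int) (k : Int) (v : Int) (p : Int), Dom_dfs links n k v p → Pre_dfs links n k v p → Spec_dfs links n k v p (dfs links n k v p)

-- ===== LEMMAS AND PROOFS =====

-- A's value at node u seen with parent 0 (no reset at the top): the quantity both programs compute
def pvVal (links : List (Int × List Int)) (n k u : Int) : Int × Int :=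
  dfsA (links.length + 1) links n k u 0

-- termination measure: size of the descendant set
def pvMu (links : List (Int × List Int)) (u : Int) : Nat := (pvDesc links u).card

-- ---- closure properties of pvDesc ----
lemma pvF_subset (links : List (Int × List Int)) (S : Finset Int) : S ⊆ pvF links S :=
  Finset.subset_union_left

lemma pvF_mono (links : List (Int × List Int)) {S T : Finset Int} (h : S ⊆ T) :
    pvF links S ⊆ pvF links T :=
  Finset.union_subset_union h (Finset.biUnion_subset_biUnion_of_subset_left _ h)

lemma pvF_iter_mono (links : List (Int × List Int)) (m : Nat) {S T : Finset Int} (h : S ⊆ T) :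
    (pvF links)^[m] S ⊆ (pvF links)^[m] T := by
  induction m generalizing S T with
  | zero => simpa using h
  | succ m ih =>
    rw [Function.iterate_succ_apply, Function.iterate_succ_apply]
    exact ih (pvF_mono links h)

lemma subset_pvF_iter (links : List (Int × List Int)) (m : Nat) (S : Finset Int) :
    S ⊆ (pvF links)^[m] S := by
  induction m with
  | zero => simp
  | succ m ih =>
    rw [Function.iterate_succ_apply']
    exact ih.trans (pvF_subset links _)

lemma pvChildren_subset_allKids (links : List (Int × List Int)) (u : Int) :
    ∀ c ∈ pvChildren links u, c ∈ (links.flatMap (fun x => x.2)).toFinset := by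
  intro c hc
  unfold pvChildren at hc
  cases hg : (PySem.Dict.mk links).get? u with
  | none => simp [hg] at hc
  | some l =>
    have hmem : (u, l) ∈ links := by
      simpa using PySem.Dict.mem_items_of_get?_eq_some (PySem.Dict.mk links) hg
    rw [hg] at hc
    simp only [Option.getD_some] at hc
    have hcl : c ∈ l := (List.mem_filter.mp hc).1
    simp only [List.mem_toFinset, List.mem_flatMap]
    exact ⟨(u, l), hmem, hcl⟩

lemma pvF_subset_allKids (links : List (Int × List Int)) {S : Finset Int}
    (h : S ⊆ (links.flatMap (fun x => x.2)).toFinset) :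
    pvF links S ⊆ (links.flatMap (fun x => x.2)).toFinset := by
  unfold pvF
  apply Finset.union_subset h
  intro c hc
  obtain ⟨u, _, hcu⟩ := Finset.mem_biUnion.mp hc
  exact pvChildren_subset_allKids links u c (by simpa using hcu)

lemma pvF_iter_subset_allKids (links : List (Int × List Int)) (m : Nat) {S : Finset Int}
    (h : S ⊆ (links.flatMap (fun x => x.2)).toFinset) :
    (pvF links)^[m] S ⊆ (links.flatMap (fun x => x.2)).toFinset := by
  induction m with
  | zero => simpa using h
  | succ m ih =>
    rw [Function.iterate_succ_apply']
    exact pvF_subset_allKids links ih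

lemma pvDesc_fix (links : List (Int × List Int)) (u : Int) :
    pvF links (pvDesc links u) = pvDesc links u := by
  have hS0 : (pvChildren links u).toFinset ⊆ (links.flatMap (fun x => x.2)).toFinset := by
    intro c hc
    exact pvChildren_subset_allKids links u c (by simpa using hc)
  have hQ : ∀ i, pvF links ((pvF links)^[i] (pvChildren links u).toFinset)
        = (pvF links)^[i] (pvChildren links u).toFinset
      ∨ i < ((pvF links)^[i] (pvChildren links u).toFinset).card := by
    intro i
    induction i with
    | zero =>
      by_cases h : (pvChildren links u).toFinset = ∅
      · left; simp [h, pvF]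
      · right
        simpa using Finset.card_pos.mpr (Finset.nonempty_iff_ne_empty.mpr h)
    | succ i ih =>
      by_cases hfix : pvF links ((pvF links)^[i + 1] (pvChildren links u).toFinset)
          = (pvF links)^[i + 1] (pvChildren links u).toFinset
      · exact Or.inl hfix
      · right
        rcases ih with hf | hc
        · exact absurd (by rw [Function.iterate_succ_apply', hf, hf]) hfix
        · have hsub : (pvF links)^[i] (pvChildren links u).toFinset
              ⊆ (pvF links)^[i + 1] (pvChildren links u).toFinset := by
            rw [Function.iterate_succ_apply']
            exact pvF_subset links _
          have hne : (pvF links)^[i] (pvChildren links u).toFinset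
              ≠ (pvF links)^[i + 1] (pvChildren links u).toFinset := by
            intro he
            have hfx : pvF links ((pvF links)^[i] (pvChildren links u).toFinset)
                = (pvF links)^[i] (pvChildren links u).toFinset :=
              ((Function.iterate_succ_apply' (pvF links) i _).symm).trans he.symm
            exact hfix (by rw [← he]; exact hfx)
          have hlt := Finset.card_lt_card (Finset.ssubset_iff_subset_ne.mpr ⟨hsub, hne⟩)
          omega
  rcases hQ (pvN links) with h | h
  · exact h
  · exfalso
    have h1 : ((pvF links)^[pvN links] (pvChildren links u).toFinset).card
        ≤ (links.flatMap (fun x => x.2)).toFinset.card :=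
      Finset.card_le_card (pvF_iter_subset_allKids links _ hS0)
    have h2 := List.toFinset_card_le (links.flatMap (fun x => x.2))
    unfold pvN at h h1
    omega

lemma pvDesc_iter_fixed (links : List (Int × List Int)) (u : Int) (m : Nat) :
    (pvF links)^[m] (pvDesc links u) = pvDesc links u :=
  Function.iterate_fixed (pvDesc_fix links u) m

lemma mem_desc_of_child (links : List (Int × List Int)) {u c : Int}
    (h : c ∈ pvChildren links u) : c ∈ pvDesc links u := by
  have := subset_pvF_iter links (pvN links) (pvChildren links u).toFinset
  exact this (by simpa using h)

lemma children_subset_desc (links : List (Int × List Int)) {u c : Int}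
    (hc : c ∈ pvDesc links u) {d : Int} (hd : d ∈ pvChildren links c) :
    d ∈ pvDesc links u := by
  have : d ∈ pvF links (pvDesc links u) := by
    apply Finset.mem_union_right
    exact Finset.mem_biUnion.mpr ⟨c, hc, by simpa using hd⟩
  rwa [pvDesc_fix] at this

lemma desc_subset_desc (links : List (Int × List Int)) {u c : Int}
    (hc : c ∈ pvDesc links u) : pvDesc links c ⊆ pvDesc links u := by
  have h1 : (pvChildren links c).toFinset ⊆ pvDesc links u := by
    intro d hd
    exact children_subset_desc links hc (by simpa using hd)
  have h2 := pvF_iter_mono links (pvN links) h1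
  rwa [pvDesc_iter_fixed] at h2

lemma pvMu_lt (links : List (Int × List Int)) {u c : Int}
    (hc : c ∈ pvDesc links u) (hac : c ∉ pvDesc links c) :
    pvMu links c < pvMu links u := by
  apply Finset.card_lt_card
  exact ⟨desc_subset_desc links hc, fun h => hac (h hc)⟩

lemma reach_child (links : List (Int × List Int)) {v u c : Int}
    (hu : u ∈ insert v (pvDesc links v)) (hc : c ∈ pvChildren links u) :
    c ∈ insert v (pvDesc links v) := by
  rcases Finset.mem_insert.mp hu with h | h
  · subst h
    exact Finset.mem_insert_of_mem (mem_desc_of_child links hc)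
  · exact Finset.mem_insert_of_mem (children_subset_desc links h hc)

lemma pvMu_le (links : List (Int × List Int)) {v u : Int}
    (hPre : ∀ w ∈ insert v (pvDesc links v), w ∈ pvKeysFin links ∧ w ∉ pvDesc links w)
    (hu : u ∈ insert v (pvDesc links v)) :
    pvMu links u ≤ links.length := by
  have hsub : pvDesc links u ⊆ pvKeysFin links := by
    intro w hw
    have hwreach : w ∈ insert v (pvDesc links v) := by
      rcases Finset.mem_insert.mp hu with h | h
      · subst h; exact Finset.mem_insert_of_mem hw
      · exact Finset.mem_insert_of_mem (desc_subset_desc links h hw)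
    exact (hPre w hwreach).1
  have h1 : pvMu links u ≤ (pvKeysFin links).card := Finset.card_le_card hsub
  have h2 : (pvKeysFin links).card ≤ (links.map Prod.fst).length := List.toFinset_card_le _
  simpa using h1.trans h2

-- ---- fuel lemmas for A's port ----
lemma dfsA_parent (links : List (Int × List Int)) (n k : Int) (f : Nat) (v p : Int) :
    dfsA (f + 1) links n k v p = pvAdjust k p (dfsA (f + 1) links n k v 0) := by
  simp only [dfsA, pvAdjust]
  split <;> simp_all

lemma dfsA_fuel (links : List (Int × List Int)) (n k v : Int)
    (hPre : ∀ w ∈ insert v (pvDesc links v), w ∈ pvKeysFin links ∧ w ∉ pvDesc links w) :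
    ∀ f g u q, u ∈ insert v (pvDesc links v) → pvMu links u < f → pvMu links u < g →
      dfsA f links n k u q = dfsA g links n k u q := by
  intro f
  induction f with
  | zero => intro g u q _ hf _; omega
  | succ f ih =>
    intro g u q hu hf hg
    cases g with
    | zero => omega
    | succ g' =>
      simp only [dfsA]
      have hfold : (((PySem.Dict.mk links).get? u).getD []).foldl (fun ab D =>
            if D = 0 then ab
            else
              let ef := dfsA f links n k D u
              (max ab.1 ef.1, ab.2 + ef.2)) ((0 : Int), (0 : Int))
          = (((PySem.Dict.mk links).get? u).getD []).foldl (fun ab D =>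
            if D = 0 then ab
            else
              let ef := dfsA g' links n k D u
              (max ab.1 ef.1, ab.2 + ef.2)) ((0 : Int), (0 : Int)) := by
        apply PySem.List.foldl_congr_mem
        intro acc D hD
        by_cases h0 : D = 0
        · simp [h0]
        · have hch : D ∈ pvChildren links u := by
            unfold pvChildren
            exact List.mem_filter.mpr ⟨hD, by simpa using h0⟩
          have hDreach := reach_child links hu hch
          have hmu := pvMu_lt links (mem_desc_of_child links hch) (hPre D hDreach).2
          rw [ih g' D u hDreach (by omega) (by omega)]
      rw [hfold]

-- characterization of pvVal at a reachable node
lemma pvVal_eq (links : List (Int × List Int)) (n k v : Int)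
    (hPre : ∀ w ∈ insert v (pvDesc links v), w ∈ pvKeysFin links ∧ w ∉ pvDesc links w)
    {u : Int} (hu : u ∈ insert v (pvDesc links v)) :
    pvVal links n k u =
      (let ab := (pvChildren links u).foldl (fun ab c =>
          let r := pvAdjust k u (pvVal links n k c)
          (max ab.1 r.1, ab.2 + r.2)) ((0 : Int), (0 : Int))
       (ab.1 + 1, ab.2)) := by
  have hukey : u ∈ pvKeysFin links := (hPre u hu).1
  have hlen : links.length ≠ 0 := by
    intro h
    rw [List.length_eq_zero_iff.mp h] at hukey
    simp [pvKeysFin] at hukey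
  obtain ⟨L, hL⟩ := Nat.exists_eq_succ_of_ne_zero hlen
  have hmu := pvMu_le links hPre hu
  conv_lhs => unfold pvVal
  conv_lhs => simp only [dfsA]
  have h1 : (((PySem.Dict.mk links).get? u).getD []).foldl (fun ab D =>
        if D = 0 then ab
        else
          let ef := dfsA links.length links n k D u
          (max ab.1 ef.1, ab.2 + ef.2)) ((0 : Int), (0 : Int))
      = (((PySem.Dict.mk links).get? u).getD []).foldl (fun ab D =>
        if D ≠ 0 then
          let r := pvAdjust k u (pvVal links n k D)
          (max ab.1 r.1, ab.2 + r.2)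
        else ab) ((0 : Int), (0 : Int)) := by
    apply PySem.List.foldl_congr_mem
    intro acc D hD
    by_cases h0 : D = 0
    · simp [h0]
    · have hch : D ∈ pvChildren links u := by
        unfold pvChildren
        exact List.mem_filter.mpr ⟨hD, by simpa using h0⟩
      have hDreach := reach_child links hu hch
      have hmuD := pvMu_lt links (mem_desc_of_child links hch) (hPre D hDreach).2
      have hpar : dfsA links.length links n k D u
          = pvAdjust k u (dfsA links.length links n k D 0) := by
        rw [hL]; exact dfsA_parent links n k L D u
      have hfuel : dfsA links.length links n k D 0
          = dfsA (links.length + 1) links n k D 0 :=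
        dfsA_fuel links n k v hPre _ _ D 0 hDreach (by omega) (by omega)
      simp only [h0, ne_eq, not_false_eq_true, if_true]
      rw [hpar, hfuel]
      rfl
  have h2 : (((PySem.Dict.mk links).get? u).getD []).foldl (fun ab D =>
        if D ≠ 0 then
          let r := pvAdjust k u (pvVal links n k D)
          (max ab.1 r.1, ab.2 + r.2)
        else ab) ((0 : Int), (0 : Int))
      = (pvChildren links u).foldl (fun ab c =>
          let r := pvAdjust k u (pvVal links n k c)
          (max ab.1 r.1, ab.2 + r.2)) ((0 : Int), (0 : Int)) := by
    unfold pvChildren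
    exact PySem.List.foldl_ite_eq_foldl_filter (fun c => c ≠ 0) _ _ _
  rw [h1, h2]
  simp

-- ---- B's sweep: persistence, soundness (Inv), progress ----
lemma stepB_persist (links : List (Int × List Int)) (k : Int)
    (res : PySem.Dict Int (Int × Int)) (w u : Int) (x : Int × Int)
    (h : res.get? u = some x) : (pvStepB links k res w).get? u = some x := by
  unfold pvStepB
  by_cases hcw : res.contains w = true
  · simp [hcw, h]
  · simp only [hcw, if_false, Bool.false_eq_true]
    split
    · have hne : u ≠ w := by
        intro he
        subst he
        rw [PySem.Dict.contains_eq_isSome_get?, h] at hcw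
        simp at hcw
      rw [PySem.Dict.get?_insert_of_ne _ _ hne]
      exact h
    · exact h

lemma foldl_stepB_persist (links : List (Int × List Int)) (k : Int) (ks : List Int)
    (res : PySem.Dict Int (Int × Int)) (u : Int) (x : Int × Int)
    (h : res.get? u = some x) : (ks.foldl (pvStepB links k) res).get? u = some x := by
  induction ks generalizing res with
  | nil => simpa using h
  | cons w t ih => exact ih _ (stepB_persist links k res w u x h)

-- soundness: every finalized reachable node carries A's value
lemma stepB_inv (links : List (Int × List Int)) (n k v : Int)
    (hPre : ∀ w ∈ insert v (pvDesc links v), w ∈ pvKeysFin links ∧ w ∉ pvDesc links w)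
    (res : PySem.Dict Int (Int × Int)) (w : Int)
    (hInv : ∀ u ∈ insert v (pvDesc links v), ∀ x, res.get? u = some x → x = pvVal links n k u) :
    ∀ u ∈ insert v (pvDesc links v), ∀ x,
      (pvStepB links k res w).get? u = some x → x = pvVal links n k u := by
  intro u hu x hx
  unfold pvStepB at hx
  by_cases hcw : res.contains w = true
  · rw [if_pos hcw] at hx
    exact hInv u hu x hx
  · rw [if_neg hcw] at hx
    by_cases hall : (pvChildren links w).all (fun c => res.contains c) = true
    · rw [if_pos hall] at hx
      by_cases huw : u = w
      · subst huw
        rw [PySem.Dict.get?_insert_self] at hx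
        have hfold : (pvChildren links u).foldl (fun ab c =>
              let r := pvAdjust k u ((res.get? c).getD ((0 : Int), (0 : Int)))
              (max ab.1 r.1, ab.2 + r.2)) ((0 : Int), (0 : Int))
            = (pvChildren links u).foldl (fun ab c =>
              let r := pvAdjust k u (pvVal links n k c)
              (max ab.1 r.1, ab.2 + r.2)) ((0 : Int), (0 : Int)) := by
          apply PySem.List.foldl_congr_mem
          intro acc c hc
          have hcon : res.contains c = true := by
            have := List.all_eq_true.mp hall c hc
            simpa using this
          rw [PySem.Dict.contains_eq_isSome_get?] at hcon
          obtain ⟨y, hy⟩ := Option.isSome_iff_exists.mp hcon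
          have hy' := hInv c (reach_child links hu hc) y hy
          rw [hy, Option.getD_some, hy']
        rw [hfold] at hx
        rw [pvVal_eq links n k v hPre hu]
        simp only [Option.some.injEq] at hx
        simpa using hx.symm
      · rw [PySem.Dict.get?_insert_of_ne _ _ huw] at hx
        exact hInv u hu x hx
    · rw [if_neg hall] at hx
      exact hInv u hu x hx

lemma foldl_stepB_inv (links : List (Int × List Int)) (n k v : Int)
    (hPre : ∀ w ∈ insert v (pvDesc links v), w ∈ pvKeysFin links ∧ w ∉ pvDesc links w)
    (ks : List Int) (res : PySem.Dict Int (Int × Int))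
    (hInv : ∀ u ∈ insert v (pvDesc links v), ∀ x, res.get? u = some x → x = pvVal links n k u) :
    ∀ u ∈ insert v (pvDesc links v), ∀ x,
      (ks.foldl (pvStepB links k) res).get? u = some x → x = pvVal links n k u := by
  induction ks generalizing res with
  | nil => simpa using hInv
  | cons w t ih => exact ih _ (stepB_inv links n k v hPre res w hInv)

-- progress within one sweep
lemma foldl_stepB_progress (links : List (Int × List Int)) (k : Int) (ks : List Int) :
    ∀ (res : PySem.Dict Int (Int × Int)) (u : Int), u ∈ ks →
    (∀ c ∈ pvChildren links u, (res.get? c).isSome) →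
    ((ks.foldl (pvStepB links k) res).get? u).isSome := by
  induction ks with
  | nil => intro res u hu _; simp at hu
  | cons w t ih =>
    intro res u hu hkids
    simp only [List.foldl_cons]
    by_cases huw : u = w
    · subst huw
      have hstep : ((pvStepB links k res u).get? u).isSome := by
        unfold pvStepB
        by_cases hcu : res.contains u = true
        · rw [if_pos hcu]
          rw [PySem.Dict.contains_eq_isSome_get?] at hcu
          exact hcu
        · rw [if_neg hcu]
          have hall : (pvChildren links u).all (fun c => res.contains c) = true := by
            rw [List.all_eq_true]
            intro c hc
            have := hkids c hc
            rw [← PySem.Dict.contains_eq_isSome_get?] at this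
            simpa using this
          rw [if_pos hall]
          rw [PySem.Dict.get?_insert_self]
          rfl
      obtain ⟨y, hy⟩ := Option.isSome_iff_exists.mp hstep
      rw [foldl_stepB_persist links k t _ u y hy]
      rfl
    · rcases List.mem_cons.mp hu with h | h
      · exact absurd h huw
      · apply ih _ _ h
        intro c hc
        obtain ⟨y, hy⟩ := Option.isSome_iff_exists.mp (hkids c hc)
        rw [stepB_persist links k res w c y hy]
        rfl

-- progress across sweeps, by strong induction on the measure
lemma rounds_complete (links : List (Int × List Int)) (n k v : Int)
    (hPre : ∀ w ∈ insert v (pvDesc links v), w ∈ pvKeysFin links ∧ w ∉ pvDesc links w) :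
    ∀ t u, u ∈ insert v (pvDesc links v) → pvMu links u < t →
      ((pvSweep links k)^[t] (PySem.Dict.empty : PySem.Dict Int (Int × Int))).get? u
        = some (pvVal links n k u) := by
  have hInvIter : ∀ t, ∀ u ∈ insert v (pvDesc links v), ∀ x,
      ((pvSweep links k)^[t] (PySem.Dict.empty : PySem.Dict Int (Int × Int))).get? u = some x →
      x = pvVal links n k u := by
    intro t
    induction t with
    | zero =>
      intro u _ x hx
      simp [PySem.Dict.get?_empty] at hx
    | succ t ih =>
      rw [Function.iterate_succ_apply']
      exact foldl_stepB_inv links n k v hPre _ _ ih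
  intro t
  induction t with
  | zero => intro u _ h; omega
  | succ t ih =>
    intro u hu hμ
    rw [Function.iterate_succ_apply']
    have hkids : ∀ c ∈ pvChildren links u,
        (((pvSweep links k)^[t] (PySem.Dict.empty : PySem.Dict Int (Int × Int))).get? c).isSome := by
      intro c hc
      have hcreach := reach_child links hu hc
      have hmuc := pvMu_lt links (mem_desc_of_child links hc) (hPre c hcreach).2
      rw [ih c hcreach (by omega)]
      rfl
    have hukeys : u ∈ (PySem.Dict.mk links).keys := by
      have := (hPre u hu).1
      simpa [PySem.Dict.keys, pvKeysFin] using this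
    have hprog := foldl_stepB_progress links k (PySem.Dict.mk links).keys _ u hukeys hkids
    obtain ⟨x, hx⟩ := Option.isSome_iff_exists.mp hprog
    have hval := hInvIter (t + 1) u hu x (by rw [Function.iterate_succ_apply']; exact hx)
    unfold pvSweep at hx ⊢
    rw [hx, hval]

lemma foldl_range_const {α : Type} (g : α → α) (t : Nat) (init : α) :
    (List.range t).foldl (fun r _ => g r) init = g^[t] init := by
  induction t generalizing init with
  | zero => rfl
  | succ t ih =>
    rw [List.range_succ, List.foldl_append, ih, Function.iterate_succ_apply']
    rfl

-- ===== VERDICT (by name: the statement is the Claim_ definition above) =====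
theorem dfs_spec : Claim_equal_dfs := by
  intro links n k v p _ hPre
  unfold Pre_dfs at hPre
  show dfs links n k v p = dfs_alt links n k v p
  have hvreach : v ∈ insert v (pvDesc links v) := Finset.mem_insert_self v _
  have hμ : pvMu links v ≤ links.length := pvMu_le links hPre hvreach
  have hkeyslen : (PySem.Dict.mk links).keys.length = links.length := by
    simp [PySem.Dict.keys]
  have hres := rounds_complete links n k v hPre ((PySem.Dict.mk links).keys.length + 1) v
      hvreach (by omega)
  unfold dfs_alt
  rw [foldl_range_const (pvSweep links k)]
  simp only [hres, Option.getD_some]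
  unfold dfs pvVal
  exact dfsA_parent links n k links.length v p
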